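-- pv_equiv track=rewrite | github.com/christian-oudard/quiz_interview | spiral_numbers.py | spiral_numbers_grid
-- ===== SOURCE A (Python) =====
-- from typing import Tuple, Dict
-- from enum import Enum
--
-- Pos = Tuple[int, int]
--
-- class Dir(Enum):
--     RIGHT = 0
--     DOWN = 1
--     LEFT = 2
--     UP = 3
--
-- def turn_right(d: Dir) -> Dir:
--     """
--     >>> turn_right(Dir.RIGHT)
--     <Dir.DOWN: 1>
--     """
--     return Dir((d.value + 1) % 4)
--
-- def one_forward(p: Pos, d: Dir):
--     """
--     >>> one_forward((-1, -1), Dir.RIGHT)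
--     (0, -1)
--     """
--     x, y = p
--     if d == Dir.RIGHT:
--         return (x + 1, y)
--     elif d == Dir.DOWN:
--         return (x, y + 1)
--     elif d == Dir.LEFT:
--         return (x - 1, y)
--     elif d == Dir.UP:
--         return (x, y - 1)
--
-- def spiral_numbers_grid(limit: int) -> Dict[Pos, int]:
--     # Start with the number 1 already added.
--     grid = {(0, 0): 1}
--     pos = (0, 0)
--     num = 1
--     direction = Dir.UP
--
--     # Always try to turn right, but if that fails, go straight.
--     while num < limit:
--         num += 1
--
--         new_dir_1 = turn_right(direction)
--         new_pos_1 = one_forward(pos, new_dir_1)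
--
--         new_dir_2 = direction
--         new_pos_2 = one_forward(pos, direction)
--
--         if new_pos_1 not in grid:
--             pos = new_pos_1
--             direction = new_dir_1
--         elif new_pos_2 not in grid:
--             pos = new_pos_2
--             direction = new_dir_2
--
--         grid[pos] = num
--
--     return grid
-- ===== SOURCE B (Python) =====
-- def spiral_numbers_grid(limit):
--     # Walk the spiral segment by segment: direction cycles R->D->L->U,
--     # run length starts at 1 and grows by 1 after every two turns.
--     grid = {(0, 0): 1}
--     x = y = 0
--     num = 1
--     run = 1
--     d = 0
--     deltas = ((1, 0), (0, 1), (-1, 0), (0, -1))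
--     while num < limit:
--         dx, dy = deltas[d]
--         for _ in range(run):
--             if num >= limit:
--                 break
--             num += 1
--             x += dx
--             y += dy
--             grid[(x, y)] = num
--         d = (d + 1) % 4
--         if d % 2 == 0:
--             run += 1
--     return grid
-- ===== Notes on version B (the rewrite author's own statement) =====
-- stated objective: faster
-- what changed: B walks the spiral segment by segment with the fixed turn schedule (direction cycles R,D,L,U; run length 1,1,2,2,3,3,... grows by one after every two turns), so the dict-membership probe A performs at every step disappears; the dict is built by pure appends in the same insertion order.
import Mathlib
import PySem

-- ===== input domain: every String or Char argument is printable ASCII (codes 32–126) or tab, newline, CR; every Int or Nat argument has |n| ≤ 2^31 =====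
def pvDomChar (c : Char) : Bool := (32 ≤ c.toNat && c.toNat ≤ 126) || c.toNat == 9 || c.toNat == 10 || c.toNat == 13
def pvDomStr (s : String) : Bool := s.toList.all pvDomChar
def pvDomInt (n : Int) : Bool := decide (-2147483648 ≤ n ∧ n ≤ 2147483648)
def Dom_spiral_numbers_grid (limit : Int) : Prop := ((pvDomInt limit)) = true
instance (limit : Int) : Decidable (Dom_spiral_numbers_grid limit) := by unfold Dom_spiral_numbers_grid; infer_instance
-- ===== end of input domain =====

-- B builds the spiral dict by walking segments on the fixed turn schedule (run lengths
-- 1,1,2,2,3,3,…) instead of probing grid membership at every step (objective: faster by a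
-- constant factor; both are one pass producing numbers 1..limit in order).

-- ===== PORT A =====
def turn_right (d : Int) : Int := PySem.Int.mod (d + 1) 4

-- d is always a Dir value 0..3 in A, so Python's implicit `return None` is unreachable;
-- the final else is the Dir.UP branch.
def one_forward (p : Int × Int) (d : Int) : Int × Int :=
  if d = 0 then (p.1 + 1, p.2)
  else if d = 1 then (p.1, p.2 + 1)
  else if d = 2 then (p.1 - 1, p.2)
  else (p.1, p.2 - 1)

-- the while-loop; fuel (limit-1).toNat is exact: each iteration increments num by 1,
-- starting from 1, and the loop stops as soon as num ≥ limit.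
def spiralLoopA (limit : Int) : Nat → PySem.Dict (Int × Int) Int → (Int × Int) → Int → Int →
    PySem.Dict (Int × Int) Int
  | 0, grid, _, _, _ => grid
  | fuel+1, grid, pos, num, direction =>
    if num < limit then
      let num' := num + 1
      let nd1 := turn_right direction
      let np1 := one_forward pos nd1
      let nd2 := direction
      let np2 := one_forward pos direction
      let pd :=
        if ¬ (grid.contains np1) then (np1, nd1)
        else if ¬ (grid.contains np2) then (np2, nd2)
        else (pos, direction)
      spiralLoopA limit fuel (grid.insert pd.1 num') pd.1 num' pd.2
    else grid

def spiral_numbers_grid (limit : Int) : List (Int × Int × Int) :=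
  let grid : PySem.Dict (Int × Int) Int := PySem.Dict.ofList [(((0:Int),(0:Int)), (1:Int))]
  (spiralLoopA limit (limit - 1).toNat grid (0, 0) 1 3).items.map (fun q => (q.1.1, q.1.2, q.2))

-- ===== PORT B =====
-- the inner `for _ in range(run)` loop with its break
def pvInnerB (limit dx dy : Int) : Nat → PySem.Dict (Int × Int) Int → Int → Int → Int →
    PySem.Dict (Int × Int) Int × Int × Int × Int
  | 0, grid, x, y, num => (grid, x, y, num)
  | k+1, grid, x, y, num =>
    if limit ≤ num then (grid, x, y, num)
    else
      let num' := num + 1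
      let x' := x + dx
      let y' := y + dy
      pvInnerB limit dx dy k (grid.insert (x', y') num') x' y' num'

-- the outer while-loop; fuel (limit-1).toNat suffices: every iteration taken advances num by ≥ 1.
def pvOuterB (limit : Int) : Nat → PySem.Dict (Int × Int) Int → Int → Int → Int → Int → Int →
    PySem.Dict (Int × Int) Int
  | 0, grid, _, _, _, _, _ => grid
  | fuel+1, grid, x, y, num, run, d =>
    if num < limit then
      let delta := PySem.List.pyGetD [((1:Int),(0:Int)), (0,1), (-1,0), (0,-1)] d ((0,0))
      let r := pvInnerB limit delta.1 delta.2 run.toNat grid x y num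
      let d' := PySem.Int.mod (d + 1) 4
      let run' := if PySem.Int.mod d' 2 = 0 then run + 1 else run
      pvOuterB limit fuel r.1 r.2.1 r.2.2.1 r.2.2.2 run' d'
    else grid

def spiral_numbers_grid_alt (limit : Int) : List (Int × Int × Int) :=
  let grid : PySem.Dict (Int × Int) Int := PySem.Dict.ofList [(((0:Int),(0:Int)), (1:Int))]
  (pvOuterB limit (limit - 1).toNat grid 0 0 1 1 0).items.map (fun q => (q.1.1, q.1.2, q.2))

-- ===== PRECONDITION & SPEC =====
def Spec_spiral_numbers_grid (limit : Int) (out : List (Int × Int × Int)) : Prop := out = spiral_numbers_grid_alt limit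
instance (limit : Int) (out : List (Int × Int × Int)) : Decidable (Spec_spiral_numbers_grid limit out) := by unfold Spec_spiral_numbers_grid; infer_instance

-- ===== CLAIM (what is proved, stated in full; the proofs are below) =====
def Claim_equal_spiral_numbers_grid : Prop := ∀ (limit : Int), Dom_spiral_numbers_grid limit → Spec_spiral_numbers_grid limit (spiral_numbers_grid limit)

-- ===== LEMMAS AND PROOFS =====
-- Reference description of the spiral path, shared by both simulations: segment s
-- (s = 0,1,2,…) moves in direction s % 4 (0=R,1=D,2=L,3=U) for pvLen s = s/2+1 steps;
-- pvP n is the n-th cell of the path, pvIdx its closed-form inverse (used for freshness),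
-- and pvSpec n the dict contents after the first n numbers are placed.
def pvDelta (s : Nat) : Int × Int :=
  if s % 4 = 0 then (1, 0) else if s % 4 = 1 then (0, 1) else if s % 4 = 2 then (-1, 0) else (0, -1)
def pvLen (s : Nat) : Nat := s / 2 + 1
def pvQ : Nat → Int × Int
  | 0 => (0, 0)
  | s+1 => ((pvQ s).1 + (pvLen s : Int) * (pvDelta s).1, (pvQ s).2 + (pvLen s : Int) * (pvDelta s).2)
def pvCell (s : Nat) (t : Int) : Int × Int :=
  ((pvQ s).1 + t * (pvDelta s).1, (pvQ s).2 + t * (pvDelta s).2)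
def pvStep (p : Nat × Nat) : Nat × Nat := if p.2 < pvLen p.1 then (p.1, p.2 + 1) else (p.1 + 1, 1)
def pvStp : Nat → Nat × Nat
  | 0 => (0, 0)
  | n+1 => pvStep (pvStp n)
def pvP (n : Nat) : Int × Int := pvCell (pvStp n).1 ((pvStp n).2 : Int)
def pvT : Nat → Nat
  | 0 => 0
  | s+1 => pvT s + pvLen s

theorem pvQ_succ (s : Nat) : pvQ (s+1) =
    ((pvQ s).1 + (pvLen s : Int) * (pvDelta s).1, (pvQ s).2 + (pvLen s : Int) * (pvDelta s).2) := rfl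

def pvDir (n : Nat) : Int := if n = 0 then 3 else ((pvStp n).1 % 4 : Nat)

theorem pvDelta0 {s : Nat} (h : s % 4 = 0) : pvDelta s = (1, 0) := by simp [pvDelta, h]
theorem pvDelta1 {s : Nat} (h : s % 4 = 1) : pvDelta s = (0, 1) := by simp [pvDelta, h]
theorem pvDelta2 {s : Nat} (h : s % 4 = 2) : pvDelta s = (-1, 0) := by simp [pvDelta, h]
theorem pvDelta3 {s : Nat} (h : s % 4 = 3) : pvDelta s = (0, -1) := by simp [pvDelta, h]

theorem pvStp_wf (n : Nat) :
    pvT (pvStp n).1 + (pvStp n).2 = n ∧ (pvStp n).2 ≤ pvLen (pvStp n).1 ∧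
      ((pvStp n).2 = 0 → (pvStp n).1 = 0 ∧ n = 0) := by
  induction n with
  | zero => simp [pvStp, pvT, pvLen]
  | succ n ih =>
    obtain ⟨h1, h2, h3⟩ := ih
    rw [show pvStp (n+1) = pvStep (pvStp n) from rfl]
    unfold pvStep
    split_ifs with h
    · exact ⟨by dsimp only; omega, by dsimp only; omega, fun hc => hc.elim⟩
    · have ht : pvT ((pvStp n).1 + 1) = pvT (pvStp n).1 + pvLen (pvStp n).1 := rfl
      have hl : 1 ≤ pvLen ((pvStp n).1 + 1) := Nat.le_add_left 1 _
      exact ⟨by dsimp only; omega, by dsimp only; exact hl, fun hc => hc.elim⟩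

theorem pvT_mono {s s' : Nat} (h : s < s') : pvT s < pvT s' := by
  induction s' with
  | zero => omega
  | succ s' ih =>
    have ht : pvT (s' + 1) = pvT s' + pvLen s' := rfl
    have hl : 1 ≤ pvLen s' := Nat.le_add_left 1 _
    rcases Nat.lt_succ_iff_lt_or_eq.mp h with h' | h'
    · have := ih h'; omega
    · subst h'; omega

theorem pvQ_cf (k : Nat) :
    pvQ (4*k) = (-(k:Int), -(k:Int)) ∧ pvQ (4*k+1) = ((k:Int)+1, -(k:Int)) ∧
      pvQ (4*k+2) = ((k:Int)+1, (k:Int)+1) ∧ pvQ (4*k+3) = (-(k:Int)-1, (k:Int)+1) := by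
  induction k with
  | zero =>
    refine ⟨rfl, ?_, ?_, ?_⟩ <;> decide
  | succ k ih =>
    obtain ⟨h0, h1, h2, h3⟩ := ih
    have l3 : pvLen (4*k+3) = 2*k+2 := by simp only [pvLen]; omega
    have l4 : pvLen (4*(k+1)) = 2*k+3 := by simp only [pvLen]; omega
    have l5 : pvLen (4*(k+1)+1) = 2*k+3 := by simp only [pvLen]; omega
    have l6 : pvLen (4*(k+1)+2) = 2*k+4 := by simp only [pvLen]; omega
    have d3 : pvDelta (4*k+3) = (0,-1) := pvDelta3 (by omega)
    have d4 : pvDelta (4*(k+1)) = (1,0) := pvDelta0 (by omega)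
    have d5 : pvDelta (4*(k+1)+1) = (0,1) := pvDelta1 (by omega)
    have d6 : pvDelta (4*(k+1)+2) = (-1,0) := pvDelta2 (by omega)
    have s0 : pvQ (4*(k+1)) = (-((k:Int)+1), -((k:Int)+1)) := by
      rw [show 4*(k+1) = (4*k+3)+1 from by ring, pvQ_succ, h3, d3, l3]
      refine Prod.ext ?_ ?_ <;> (dsimp only; push_cast; ring)
    have s1 : pvQ (4*(k+1)+1) = ((k:Int)+1+1, -((k:Int)+1)) := by
      rw [pvQ_succ, s0, d4, l4]
      refine Prod.ext ?_ ?_ <;> (dsimp only; push_cast; ring)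
    have s2 : pvQ (4*(k+1)+2) = ((k:Int)+1+1, (k:Int)+1+1) := by
      rw [show 4*(k+1)+2 = (4*(k+1)+1)+1 from by ring, pvQ_succ, s1, d5, l5]
      refine Prod.ext ?_ ?_ <;> (dsimp only; push_cast; ring)
    have s3 : pvQ (4*(k+1)+3) = (-((k:Int)+1)-1, (k:Int)+1+1) := by
      rw [show 4*(k+1)+3 = (4*(k+1)+2)+1 from by ring, pvQ_succ, s2, d6, l6]
      refine Prod.ext ?_ ?_ <;> (dsimp only; push_cast; ring)
    refine ⟨?_, ?_, ?_, ?_⟩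
    · rw [s0]; refine Prod.ext ?_ ?_ <;> (dsimp only; push_cast; ring)
    · rw [s1]; refine Prod.ext ?_ ?_ <;> (dsimp only; push_cast; ring)
    · rw [s2]; refine Prod.ext ?_ ?_ <;> (dsimp only; push_cast; ring)
    · rw [s3]; refine Prod.ext ?_ ?_ <;> (dsimp only; push_cast; ring)

theorem pvT_cf (k : Nat) :
    pvT (4*k) = 2*k*(2*k+1) ∧ pvT (4*k+1) = (2*k+1)*(2*k+1) ∧
      pvT (4*k+2) = (2*k+1)*(2*k+2) ∧ pvT (4*k+3) = (2*k+2)*(2*k+2) := by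
  induction k with
  | zero => refine ⟨rfl, rfl, rfl, rfl⟩
  | succ k ih =>
    obtain ⟨h0, h1, h2, h3⟩ := ih
    have l3 : pvLen (4*k+3) = 2*k+2 := by simp only [pvLen]; omega
    have l4 : pvLen (4*(k+1)) = 2*k+3 := by simp only [pvLen]; omega
    have l5 : pvLen (4*(k+1)+1) = 2*k+3 := by simp only [pvLen]; omega
    have l6 : pvLen (4*(k+1)+2) = 2*k+4 := by simp only [pvLen]; omega
    have s0 : pvT (4*(k+1)) = pvT (4*k+3) + pvLen (4*k+3) := by
      rw [show 4*(k+1) = (4*k+3)+1 from by ring]; rfl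
    have s1 : pvT (4*(k+1)+1) = pvT (4*(k+1)) + pvLen (4*(k+1)) := rfl
    have s2 : pvT (4*(k+1)+2) = pvT (4*(k+1)+1) + pvLen (4*(k+1)+1) := rfl
    have s3 : pvT (4*(k+1)+3) = pvT (4*(k+1)+2) + pvLen (4*(k+1)+2) := rfl
    refine ⟨by rw [s0, h3, l3]; ring, by rw [s1, s0, h3, l3, l4]; ring,
            by rw [s2, s1, s0, h3, l3, l4, l5]; ring, by rw [s3, s2, s1, s0, h3, l3, l4, l5, l6]; ring⟩

def pvIdx (p : Int × Int) : Int :=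
  if 1 ≤ p.2 ∧ -p.2 ≤ p.1 ∧ p.1 ≤ p.2 - 1 then (2*p.2 - 1) * (2*p.2) + p.2 - p.1
  else if 1 ≤ p.1 ∧ 2 - p.1 ≤ p.2 ∧ p.2 ≤ p.1 then (2*p.1 - 1) * (2*p.1 - 1) + p.2 + p.1 - 1
  else if p.1 ≤ -1 ∧ p.1 ≤ p.2 ∧ p.2 ≤ -p.1 - 1 then 4*p.1*p.1 - p.1 - p.2
  else if p.2 ≤ 0 ∧ p.2 + 1 ≤ p.1 ∧ p.1 ≤ 1 - p.2 then (-2*p.2) * (-2*p.2 + 1) + p.1 - p.2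
  else 0

theorem pvT_mono_le {s s' : Nat} (h : s ≤ s') : pvT s ≤ pvT s' := by
  rcases Nat.lt_or_ge s s' with h' | h'
  · exact Nat.le_of_lt (pvT_mono h')
  · have : s = s' := by omega
    simp [this]

theorem pvIdx_cell (s : Nat) (t : Nat) (h1 : 1 ≤ t) (h2 : t ≤ pvLen s) :
    pvIdx (pvCell s (t : Int)) = (pvT s : Int) + (t : Int) := by
  have hlen : pvLen s = s / 2 + 1 := rfl
  rcases (by omega : s % 4 = 0 ∨ s % 4 = 1 ∨ s % 4 = 2 ∨ s % 4 = 3) with h | h | h | h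
  · obtain ⟨k, hs⟩ : ∃ k, s = 4 * k := ⟨s / 4, by omega⟩
    subst hs
    obtain ⟨q0, q1, q2, q3⟩ := pvQ_cf k
    obtain ⟨t0, t1, t2, t3⟩ := pvT_cf k
    have hl : t ≤ 2 * k + 1 := by rw [hlen] at h2; omega
    rw [pvCell, q0, pvDelta0 (by omega), t0, pvIdx]
    dsimp only
    split_ifs <;> first | (push_cast; ring1) | (exfalso; omega)
  · obtain ⟨k, hs⟩ : ∃ k, s = 4 * k + 1 := ⟨s / 4, by omega⟩
    subst hs
    obtain ⟨q0, q1, q2, q3⟩ := pvQ_cf k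
    obtain ⟨t0, t1, t2, t3⟩ := pvT_cf k
    have hl : t ≤ 2 * k + 1 := by rw [hlen] at h2; omega
    rw [pvCell, q1, pvDelta1 (by omega), t1, pvIdx]
    dsimp only
    split_ifs <;> first | (push_cast; ring1) | (exfalso; omega)
  · obtain ⟨k, hs⟩ : ∃ k, s = 4 * k + 2 := ⟨s / 4, by omega⟩
    subst hs
    obtain ⟨q0, q1, q2, q3⟩ := pvQ_cf k
    obtain ⟨t0, t1, t2, t3⟩ := pvT_cf k
    have hl : t ≤ 2 * k + 2 := by rw [hlen] at h2; omega
    rw [pvCell, q2, pvDelta2 (by omega), t2, pvIdx]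
    dsimp only
    split_ifs <;> first | (push_cast; ring1) | (exfalso; omega)
  · obtain ⟨k, hs⟩ : ∃ k, s = 4 * k + 3 := ⟨s / 4, by omega⟩
    subst hs
    obtain ⟨q0, q1, q2, q3⟩ := pvQ_cf k
    obtain ⟨t0, t1, t2, t3⟩ := pvT_cf k
    have hl : t ≤ 2 * k + 2 := by rw [hlen] at h2; omega
    rw [pvCell, q3, pvDelta3 (by omega), t3, pvIdx]
    dsimp only
    split_ifs <;> first | (push_cast; ring1) | (exfalso; omega)

theorem pvStp_of (s t : Nat) (h1 : 1 ≤ t) (h2 : t ≤ pvLen s) : pvStp (pvT s + t) = (s, t) := by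
  obtain ⟨w1, w2, w3⟩ := pvStp_wf (pvT s + t)
  have hne : ¬ (pvStp (pvT s + t)).2 = 0 := by
    intro h0
    obtain ⟨_, hn⟩ := w3 h0
    omega
  have hs : (pvStp (pvT s + t)).1 = s := by
    rcases Nat.lt_trichotomy (pvStp (pvT s + t)).1 s with h | h | h
    · have hm : pvT ((pvStp (pvT s + t)).1 + 1) ≤ pvT s := pvT_mono_le (by omega)
      have he : pvT ((pvStp (pvT s + t)).1 + 1) = pvT (pvStp (pvT s + t)).1 + pvLen (pvStp (pvT s + t)).1 := rfl
      omega
    · exact h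
    · have hm : pvT (s + 1) ≤ pvT (pvStp (pvT s + t)).1 := pvT_mono_le (by omega)
      have he : pvT (s + 1) = pvT s + pvLen s := rfl
      omega
  have ht : (pvStp (pvT s + t)).2 = t := by rw [hs] at w1; omega
  exact Prod.ext hs ht

theorem pvCell_zero (s : Nat) : pvCell s 0 = pvQ s := by
  rw [pvCell]; exact Prod.ext (by dsimp only; ring) (by dsimp only; ring)

theorem pvCell_end (s : Nat) : pvCell s ((pvLen s : Nat) : Int) = pvQ (s + 1) := by
  rw [pvCell, pvQ_succ]

theorem pvP_cell (s t : Nat) (h2 : t ≤ pvLen s) : pvP (pvT s + t) = pvCell s (t : Int) := by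
  rcases Nat.eq_zero_or_pos t with h1 | h1
  · subst h1
    rw [Nat.cast_zero, pvCell_zero]
    cases s with
    | zero => rfl
    | succ s' =>
      have he : pvT (s' + 1) = pvT s' + pvLen s' := rfl
      rw [Nat.add_zero, he, pvP, pvStp_of s' (pvLen s') (Nat.le_add_left 1 _) (Nat.le_refl _)]
      exact pvCell_end s'
  · rw [pvP, pvStp_of s t h1 h2]

theorem pvIdx_P (n : Nat) : pvIdx (pvP n) = (n : Int) := by
  obtain ⟨w1, w2, w3⟩ := pvStp_wf n
  rcases Nat.eq_zero_or_pos (pvStp n).2 with h0 | h0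
  · obtain ⟨hs, hn⟩ := w3 h0
    subst hn
    have : pvP 0 = ((0 : Int), (0 : Int)) := rfl
    rw [this, pvIdx]
    norm_num
  · rw [pvP, pvIdx_cell _ _ h0 w2]
    omega

theorem pvP_inj {m n : Nat} (h : pvP m = pvP n) : m = n := by
  have h1 := pvIdx_P m
  have h2 := pvIdx_P n
  rw [h] at h1
  omega

theorem pvLen_add_two (s : Nat) : pvLen (s + 2) = pvLen s + 1 := by simp only [pvLen]; omega

theorem pvDelta_add_two (s : Nat) : pvDelta (s + 2) = (-(pvDelta s).1, -(pvDelta s).2) := by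
  rcases (by omega : s % 4 = 0 ∨ s % 4 = 1 ∨ s % 4 = 2 ∨ s % 4 = 3) with h | h | h | h
  · rw [pvDelta0 h, pvDelta2 (by omega)]; norm_num
  · rw [pvDelta1 h, pvDelta3 (by omega)]; norm_num
  · rw [pvDelta2 h, pvDelta0 (by omega)]; norm_num
  · rw [pvDelta3 h, pvDelta1 (by omega)]; norm_num

theorem pvDelta_add_four (s : Nat) : pvDelta (s + 4) = pvDelta s := by
  rw [show s + 4 = (s + 2) + 2 from rfl, pvDelta_add_two, pvDelta_add_two]
  exact Prod.ext (by dsimp only; ring) (by dsimp only; ring)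

theorem pvQ_shift (s : Nat) :
    pvQ (s + 4) = ((pvQ s).1 - (pvDelta s).1 - (pvDelta (s + 1)).1,
                   (pvQ s).2 - (pvDelta s).2 - (pvDelta (s + 1)).2) := by
  have e1 : pvQ (s + 1) = _ := pvQ_succ s
  have e2 : pvQ (s + 2) = _ := pvQ_succ (s + 1)
  have e3 : pvQ (s + 3) = _ := pvQ_succ (s + 2)
  have e4 : pvQ (s + 4) = _ := pvQ_succ (s + 3)
  rw [e4, e3, e2, e1, pvDelta_add_two s, pvDelta_add_two (s + 1), pvLen_add_two s, pvLen_add_two (s + 1)]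
  refine Prod.ext ?_ ?_ <;> (dsimp only; push_cast; ring)

theorem pvNeighbor (s : Nat) (t : Int) :
    ((pvCell (s + 4) t).1 + (pvDelta (s + 1)).1, (pvCell (s + 4) t).2 + (pvDelta (s + 1)).2) =
      pvCell s (t - 1) := by
  rw [pvCell, pvCell, pvQ_shift, pvDelta_add_four]
  refine Prod.ext ?_ ?_ <;> (dsimp only; ring)

theorem one_forward_eq (p : Int × Int) (s : Nat) :
    one_forward p ((s % 4 : Nat) : Int) = (p.1 + (pvDelta s).1, p.2 + (pvDelta s).2) := by
  rcases (by omega : s % 4 = 0 ∨ s % 4 = 1 ∨ s % 4 = 2 ∨ s % 4 = 3) with h | h | h | h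
  · rw [pvDelta0 h, h, one_forward]; norm_num
  · rw [pvDelta1 h, h, one_forward]; norm_num
  · rw [pvDelta2 h, h, one_forward]; norm_num; ring
  · rw [pvDelta3 h, h, one_forward]; norm_num; ring

theorem turn_right_eq (s : Nat) :
    turn_right ((s % 4 : Nat) : Int) = (((s + 1) % 4 : Nat) : Int) := by
  rw [turn_right, PySem.Int.mod_eq_emod_of_pos (by norm_num)]
  omega

theorem pvCell_add_delta (s : Nat) (t : Int) :
    ((pvCell s t).1 + (pvDelta s).1, (pvCell s t).2 + (pvDelta s).2) = pvCell s (t + 1) := by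
  rw [pvCell, pvCell]
  refine Prod.ext ?_ ?_ <;> (dsimp only; ring)

theorem pvP_fresh (m j : Nat) (h : j ≤ m) : pvP j ≠ pvP (m + 1) := by
  intro he
  have := pvP_inj he
  omega

theorem pvDir_succ (m : Nat) : pvDir (m + 1) = (((pvStp (m + 1)).1 % 4 : Nat) : Int) := by
  rw [pvDir]; norm_num

theorem pvDecision (m : Nat) :
    (one_forward (pvP m) (turn_right (pvDir m)) = pvP (m + 1)
      ∧ pvDir (m + 1) = turn_right (pvDir m))
  ∨ ((∃ j, j ≤ m ∧ pvP j = one_forward (pvP m) (turn_right (pvDir m)))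
      ∧ one_forward (pvP m) (pvDir m) = pvP (m + 1)
      ∧ pvDir (m + 1) = pvDir m) := by
  cases m with
  | zero => left; constructor <;> decide
  | succ m' =>
    set n := m' + 1 with hn
    obtain ⟨w1, w2, w3⟩ := pvStp_wf n
    have ht1 : 1 ≤ (pvStp n).2 := by
      rcases Nat.eq_zero_or_pos (pvStp n).2 with h0 | h0
      · exact absurd (w3 h0).2 (by omega)
      · exact h0
    -- abbreviations
    have hdir : pvDir n = (((pvStp n).1 % 4 : Nat) : Int) := by rw [pvDir]; simp [hn]
    have hP : pvP n = pvCell (pvStp n).1 ((pvStp n).2 : Int) := rfl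
    rcases Nat.lt_or_ge (pvStp n).2 (pvLen (pvStp n).1) with hlt | hge
    -- straight: offset below segment length
    · right
      have hstep : pvStp (n + 1) = ((pvStp n).1, (pvStp n).2 + 1) := by
        rw [show pvStp (n + 1) = pvStep (pvStp n) from rfl, pvStep, if_pos hlt]
      refine ⟨?_, ?_, ?_⟩
      · -- the right-hand neighbour has already been visited
        rw [hP, hdir, turn_right_eq, one_forward_eq]
        rcases Nat.lt_or_ge (pvStp n).1 4 with hs4 | hs4
        · -- small segments: only s = 2 or 3 with t = 1 have interior cells
          have hlen : pvLen (pvStp n).1 = (pvStp n).1 / 2 + 1 := rfl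
          have : ((pvStp n).1 = 2 ∨ (pvStp n).1 = 3) ∧ (pvStp n).2 = 1 := by omega
          obtain ⟨hs, ht⟩ := this
          refine ⟨0, by omega, ?_⟩
          rcases hs with hs | hs <;> rw [hs, ht] <;> decide
        · obtain ⟨s', hs'⟩ : ∃ s', (pvStp n).1 = s' + 4 := ⟨(pvStp n).1 - 4, by omega⟩
          rw [hs', show s' + 4 + 1 = (s' + 1) + 4 from by ring, pvDelta_add_four, pvNeighbor]
          have hlen2 : pvLen (s' + 4) = pvLen s' + 2 := by simp only [pvLen]; omega
          have hTlt : pvT s' < pvT (s' + 4) := pvT_mono (by omega)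
          refine ⟨pvT s' + ((pvStp n).2 - 1), by rw [hs'] at w1; omega, ?_⟩
          have hcast : ((((pvStp n).2 - 1 : Nat)) : Int) = ((pvStp n).2 : Int) - 1 := by omega
          rw [pvP_cell s' ((pvStp n).2 - 1) (by rw [hs'] at hlt; omega), hcast]
      · rw [hP, hdir, one_forward_eq, pvCell_add_delta, show pvP (n + 1) = pvCell (pvStp (n + 1)).1 ((pvStp (n + 1)).2 : Int) from rfl, hstep]
        have hcast : (((pvStp n).2 + 1 : Nat) : Int) = ((pvStp n).2 : Int) + 1 := by omega
        rw [hcast]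
      · rw [pvDir_succ, hstep, hdir]
    -- turn: at the end of the segment
    · left
      have hstep : pvStp (n + 1) = ((pvStp n).1 + 1, 1) := by
        rw [show pvStp (n + 1) = pvStep (pvStp n) from rfl, pvStep, if_neg (by omega)]
      have ht : (pvStp n).2 = pvLen (pvStp n).1 := by omega
      constructor
      · rw [hP, hdir, turn_right_eq, one_forward_eq, ht, pvCell_end, show pvP (n + 1) = pvCell (pvStp (n + 1)).1 ((pvStp (n + 1)).2 : Int) from rfl, hstep]
        rw [pvCell]
        refine Prod.ext ?_ ?_ <;> (dsimp only; push_cast; ring)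
      · rw [pvDir_succ, hstep, hdir, turn_right_eq]

def pvSpec (n : Nat) : List ((Int × Int) × Int) := (List.range n).map (fun m => (pvP m, (m : Int) + 1))

theorem pvSpec_succ (n : Nat) : pvSpec (n + 1) = pvSpec n ++ [(pvP n, (n : Int) + 1)] := by
  rw [pvSpec, pvSpec, List.range_succ, List.map_append]
  rfl

theorem pvKeys {n : Nat} {d : PySem.Dict (Int × Int) Int} (hg : d.items = pvSpec n) :
    d.keys = (List.range n).map pvP := by
  simp only [PySem.Dict.keys, hg, pvSpec, List.map_map]
  rfl

theorem pvContains_false {n : Nat} {d : PySem.Dict (Int × Int) Int} (hg : d.items = pvSpec n)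
    {p : Int × Int} (h : ∀ j, j < n → pvP j ≠ p) : d.contains p = false := by
  rw [PySem.Dict.contains_eq_decide_mem_keys, pvKeys hg]
  simp only [decide_eq_false_iff_not, List.mem_map, List.mem_range]
  rintro ⟨j, hj, he⟩
  exact h j hj he

theorem pvContains_true {n : Nat} {d : PySem.Dict (Int × Int) Int} (hg : d.items = pvSpec n)
    {p : Int × Int} (h : ∃ j, j < n ∧ pvP j = p) : d.contains p = true := by
  rw [PySem.Dict.contains_eq_decide_mem_keys, pvKeys hg]
  simp only [decide_eq_true_eq, List.mem_map, List.mem_range]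
  obtain ⟨j, hj, he⟩ := h
  exact ⟨j, hj, he⟩

theorem pvInsert {n : Nat} {d : PySem.Dict (Int × Int) Int} (hg : d.items = pvSpec n) :
    (d.insert (pvP n) ((n : Int) + 1)).items = pvSpec (n + 1) := by
  have hc : d.contains (pvP n) = false :=
    pvContains_false hg (fun j hj he => absurd (pvP_inj he) (by omega))
  rw [PySem.Dict.items_insert_of_not_contains _ _ hc, hg, pvSpec_succ]

theorem loopA_spec (limit : Int) (f : Nat) : ∀ (m : Nat) (grid : PySem.Dict (Int × Int) Int),
    grid.items = pvSpec (m + 1) → limit - (m + 1) ≤ (f : Int) →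
    (spiralLoopA limit f grid (pvP m) ((m : Int) + 1) (pvDir m)).items = pvSpec (max (m + 1) limit.toNat) := by
  induction f with
  | zero =>
    intro m grid hg hf
    rw [spiralLoopA, hg]
    congr 1
    omega
  | succ f ih =>
    intro m grid hg hf
    rw [spiralLoopA]
    split_ifs with hlt
    · dsimp only
      have hfresh : ∀ j, j < m + 1 → pvP j ≠ pvP (m + 1) := fun j hj => pvP_fresh m j (by omega)
      have hins : (grid.insert (pvP (m + 1)) (((m : Int) + 1) + 1)).items = pvSpec (m + 2) := by
        have := pvInsert (n := m + 1) hg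
        rw [show (((m + 1 : Nat) : Int) + 1) = ((m : Int) + 1) + 1 from by push_cast; ring] at this
        exact this
      have hrec : ∀ (g' : PySem.Dict (Int × Int) Int), g'.items = pvSpec (m + 2) →
          (spiralLoopA limit f g' (pvP (m + 1)) (((m : Int) + 1) + 1) (pvDir (m + 1))).items =
            pvSpec (max (m + 1 + 1) limit.toNat) := by
        intro g' hg'
        have := ih (m + 1) g' hg' (by push_cast; omega)
        rw [show (((m + 1 : Nat) : Int) + 1) = ((m : Int) + 1) + 1 from by push_cast; ring] at this
        exact this
      have hmax : max (m + 1 + 1) limit.toNat = max (m + 1) limit.toNat := by omega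
      rcases pvDecision m with ⟨e1, e2⟩ | ⟨⟨j, hj, hjp⟩, e1, e2⟩
      · rw [e1]
        rw [pvContains_false hg hfresh]
        simp only [Bool.false_eq_true, not_false_eq_true, if_true]
        rw [← e2] at *
        rw [hrec _ hins, hmax]
      · rw [pvContains_true hg ⟨j, by omega, hjp.trans rfl⟩]
        simp only [not_true_eq_false, if_false]
        rw [e1, pvContains_false hg hfresh]
        simp only [Bool.false_eq_true, not_false_eq_true, if_true]
        rw [← e2] at *
        rw [hrec _ hins, hmax]
    · rw [hg]
      congr 1
      omega

theorem pyGetD_delta (s : Nat) :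
    PySem.List.pyGetD [((1:Int),(0:Int)), (0,1), (-1,0), (0,-1)] ((s % 4 : Nat) : Int) ((0:Int),(0:Int)) = pvDelta s := by
  rcases (by omega : s % 4 = 0 ∨ s % 4 = 1 ∨ s % 4 = 2 ∨ s % 4 = 3) with h | h | h | h
  · rw [h, PySem.List.pyGetD_natCast, pvDelta0 h]; rfl
  · rw [h, PySem.List.pyGetD_natCast, pvDelta1 h]; rfl
  · rw [h, PySem.List.pyGetD_natCast, pvDelta2 h]; rfl
  · rw [h, PySem.List.pyGetD_natCast, pvDelta3 h]; rfl

theorem pvRun_update (s : Nat) :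
    (if PySem.Int.mod (((s + 1) % 4 : Nat) : Int) 2 = 0 then (pvLen s : Int) + 1 else (pvLen s : Int))
      = ((pvLen (s + 1) : Nat) : Int) := by
  rw [PySem.Int.mod_eq_emod_of_pos (by norm_num)]
  simp only [pvLen]
  split_ifs with h <;> omega

-- inner loop, case 1: the whole segment fits below limit
theorem innerB_full (limit : Int) (s : Nat) (k : Nat) : ∀ (j : Nat) (grid : PySem.Dict (Int × Int) Int),
    j + k = pvLen s → grid.items = pvSpec (pvT s + j + 1) →
    ((pvT s + j + 1 + k : Nat) : Int) ≤ limit →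
    pvInnerB limit (pvDelta s).1 (pvDelta s).2 k grid (pvCell s (j : Int)).1 (pvCell s (j : Int)).2
        ((pvT s + j + 1 : Nat) : Int) =
      (PySem.Dict.mk (pvSpec (pvT s + j + 1 + k)), (pvCell s ((j + k : Nat) : Int)).1,
        (pvCell s ((j + k : Nat) : Int)).2, ((pvT s + j + 1 + k : Nat) : Int)) := by
  induction k with
  | zero =>
    intro j grid hk hg hlim
    rw [pvInnerB, ← hg]
    rfl
  | succ k ih =>
    intro j grid hk hg hlim
    rw [pvInnerB, if_neg (by push_cast at hlim ⊢; omega)]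
    dsimp only
    have hcell : ((pvCell s (j : Int)).1 + (pvDelta s).1, (pvCell s (j : Int)).2 + (pvDelta s).2)
        = pvCell s (((j + 1 : Nat) : Int)) := by rw [pvCell_add_delta]; norm_num
    have hc1 := congrArg Prod.fst hcell
    have hc2 := congrArg Prod.snd hcell
    dsimp only at hc1 hc2
    have hins : (grid.insert (pvCell s ((j + 1 : Nat) : Int)) (((pvT s + j + 1 : Nat) : Int) + 1)).items
        = pvSpec (pvT s + (j + 1) + 1) := by
      rw [show pvCell s ((j + 1 : Nat) : Int) = pvP (pvT s + (j + 1)) from (pvP_cell s (j + 1) (by omega)).symm]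
      exact_mod_cast pvInsert (n := pvT s + j + 1) hg
    rw [show pvT s + j + 1 + (k + 1) = pvT s + (j + 1) + 1 + k from by omega,
        show j + (k + 1) = (j + 1) + k from by omega,
        hc1, hc2,
        show ((pvCell s ((j + 1 : Nat) : Int)).1, (pvCell s ((j + 1 : Nat) : Int)).2)
          = pvCell s ((j + 1 : Nat) : Int) from rfl,
        show ((pvT s + j + 1 : Nat) : Int) + 1 = ((pvT s + (j + 1) + 1 : Nat) : Int) from by push_cast; ring]
    exact ih (j + 1) _ (by omega) hins (by push_cast at hlim ⊢; omega)

-- inner loop, case 2: limit is reached inside the segment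
theorem innerB_partial (limit : Int) (s : Nat) (k : Nat) : ∀ (j : Nat) (grid : PySem.Dict (Int × Int) Int),
    j + k = pvLen s → grid.items = pvSpec (pvT s + j + 1) →
    limit < ((pvT s + j + 1 + k : Nat) : Int) →
    (pvInnerB limit (pvDelta s).1 (pvDelta s).2 k grid (pvCell s (j : Int)).1 (pvCell s (j : Int)).2
        ((pvT s + j + 1 : Nat) : Int)).1.items = pvSpec (max (pvT s + j + 1) limit.toNat) ∧
    limit ≤ (pvInnerB limit (pvDelta s).1 (pvDelta s).2 k grid (pvCell s (j : Int)).1 (pvCell s (j : Int)).2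
        ((pvT s + j + 1 : Nat) : Int)).2.2.2 := by
  induction k with
  | zero =>
    intro j grid hk hg hlim
    rw [pvInnerB]
    refine ⟨by rw [hg]; congr 1; push_cast at hlim; omega, by push_cast at hlim ⊢; omega⟩
  | succ k ih =>
    intro j grid hk hg hlim
    rw [pvInnerB]
    split_ifs with hle
    · refine ⟨by rw [hg]; congr 1; push_cast at hle; omega, hle⟩
    · dsimp only
      have hcell : ((pvCell s (j : Int)).1 + (pvDelta s).1, (pvCell s (j : Int)).2 + (pvDelta s).2)
          = pvCell s (((j + 1 : Nat) : Int)) := by rw [pvCell_add_delta]; norm_num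
      have hc1 := congrArg Prod.fst hcell
      have hc2 := congrArg Prod.snd hcell
      dsimp only at hc1 hc2
      have hins : (grid.insert (pvCell s ((j + 1 : Nat) : Int)) (((pvT s + j + 1 : Nat) : Int) + 1)).items
          = pvSpec (pvT s + (j + 1) + 1) := by
        rw [show pvCell s ((j + 1 : Nat) : Int) = pvP (pvT s + (j + 1)) from (pvP_cell s (j + 1) (by omega)).symm]
        exact_mod_cast pvInsert (n := pvT s + j + 1) hg
      rw [hc1, hc2,
          show ((pvCell s ((j + 1 : Nat) : Int)).1, (pvCell s ((j + 1 : Nat) : Int)).2)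
            = pvCell s ((j + 1 : Nat) : Int) from rfl,
          show ((pvT s + j + 1 : Nat) : Int) + 1 = ((pvT s + (j + 1) + 1 : Nat) : Int) from by push_cast; ring]
      have := ih (j + 1) _ (by omega) hins (by push_cast at hlim ⊢; omega)
      rwa [show max (pvT s + (j + 1) + 1) limit.toNat = max (pvT s + j + 1) limit.toNat from by
            push_cast at hle; omega] at this

theorem outer_done (limit : Int) (f : Nat) (grid : PySem.Dict (Int × Int) Int) (x y num run d : Int)
    (h : limit ≤ num) : pvOuterB limit f grid x y num run d = grid := by
  cases f with
  | zero => rfl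
  | succ f => rw [pvOuterB, if_neg (by omega)]

theorem outerB_spec (limit : Int) (f : Nat) : ∀ (s : Nat) (grid : PySem.Dict (Int × Int) Int),
    grid.items = pvSpec (pvT s + 1) → limit - ((pvT s : Int) + 1) ≤ (f : Int) →
    (pvOuterB limit f grid (pvQ s).1 (pvQ s).2 ((pvT s + 1 : Nat) : Int) ((pvLen s : Nat) : Int)
        ((s % 4 : Nat) : Int)).items = pvSpec (max (pvT s + 1) limit.toNat) := by
  induction f with
  | zero =>
    intro s grid hg hf
    rw [pvOuterB, hg]
    congr 1
    push_cast at hf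
    omega
  | succ f ih =>
    intro s grid hg hf
    rw [pvOuterB]
    split_ifs with hlt
    · dsimp only
      rw [pyGetD_delta s,
          show ((pvLen s : Nat) : Int).toNat = pvLen s from by simp,
          show (pvQ s).1 = (pvCell s ((0 : Nat) : Int)).1 from by rw [Nat.cast_zero, pvCell_zero],
          show (pvQ s).2 = (pvCell s ((0 : Nat) : Int)).2 from by rw [Nat.cast_zero, pvCell_zero],
          show ((pvT s + 1 : Nat) : Int) = ((pvT s + 0 + 1 : Nat) : Int) from by norm_num]
      have hmod : PySem.Int.mod (((s % 4 : Nat) : Int) + 1) 4 = (((s + 1) % 4 : Nat) : Int) := by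
        have := turn_right_eq s
        rwa [turn_right] at this
      rcases le_or_gt ((pvT s + 0 + 1 + pvLen s : Nat) : Int) limit with hfull | hpart
      · rw [innerB_full limit s (pvLen s) 0 grid (by omega) (by rw [hg]) hfull]
        dsimp only
        rw [hmod, pvRun_update s,
            show (0 + pvLen s) = pvLen s from by omega,
            show pvT s + 0 + 1 + pvLen s = pvT (s + 1) + 1 from by
              rw [show pvT (s + 1) = pvT s + pvLen s from rfl]; omega,
            show pvCell s ((pvLen s : Nat) : Int) = pvQ (s + 1) from pvCell_end s]
        have hlen1 : 1 ≤ pvLen s := Nat.le_add_left 1 _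
        have := ih (s + 1) (PySem.Dict.mk (pvSpec (pvT (s + 1) + 1))) rfl
          (by rw [show pvT (s + 1) = pvT s + pvLen s from rfl]; push_cast at hf ⊢; omega)
        rw [this]
        congr 1
        rw [show pvT (s + 1) = pvT s + pvLen s from rfl]
        push_cast at hlt
        omega
      · obtain ⟨p1, p2⟩ := innerB_partial limit s (pvLen s) 0 grid (by omega) (by rw [hg]) hpart
        rw [outer_done _ _ _ _ _ _ _ _ p2, p1]
    · rw [hg]
      congr 1
      push_cast at hlt
      omega

theorem pv_main (limit : Int) : spiral_numbers_grid limit = spiral_numbers_grid_alt limit := by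
  rw [spiral_numbers_grid, spiral_numbers_grid_alt]
  have h0 : (PySem.Dict.ofList [(((0:Int),(0:Int)), (1:Int))] : PySem.Dict (Int × Int) Int).items
      = pvSpec 1 := by decide
  have hA := loopA_spec limit (limit - 1).toNat 0 (PySem.Dict.ofList [(((0:Int),(0:Int)), (1:Int))])
    h0 (by push_cast; omega)
  have hB := outerB_spec limit (limit - 1).toNat 0 (PySem.Dict.ofList [(((0:Int),(0:Int)), (1:Int))])
    h0 (by omega)
  rw [show pvP 0 = ((0:Int), (0:Int)) from rfl, show pvDir 0 = (3:Int) from rfl,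
      show ((0:Nat) : Int) + 1 = (1:Int) from by norm_num] at hA
  rw [show (pvQ 0).1 = (0:Int) from rfl, show (pvQ 0).2 = (0:Int) from rfl,
      show ((pvT 0 + 1 : Nat) : Int) = (1:Int) from rfl,
      show ((pvLen 0 : Nat) : Int) = (1:Int) from rfl,
      show ((0 % 4 : Nat) : Int) = (0:Int) from rfl] at hB
  rw [show pvT 0 + 1 = 0 + 1 from rfl] at hB
  rw [hA, hB]

-- ===== VERDICT (by name: the statement is the Claim_ definition above) =====
theorem spiral_numbers_grid_spec : Claim_equal_spiral_numbers_grid := by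
  intro limit _h
  exact pv_main limit
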